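-- pv_equiv track=rewrite | github.com/keipaglows/doctor-appointment-demo | doctor_appointment_demo/resources/appointments.py | _make_exam_room_time_map
-- ===== SOURCE A (Python) =====
-- from collections import defaultdict
-- from typing import List
--
-- def _make_exam_room_time_map(appointments: List[dict]):
--     exam_room_time_map = defaultdict(dict)
--
--     for appointment in appointments:
--         exam_room = appointment['exam_room']
--         scheduled_time = appointment['scheduled_time'].split('T')[1]
--
--         if not exam_room_time_map[exam_room]:
--             exam_room_time_map[exam_room] = []
--
--         exam_room_time_map[exam_room].append(scheduled_time)
--
--     return exam_room_time_map
-- ===== SOURCE B (Python) =====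
-- from collections import defaultdict
-- from typing import List
--
--
-- def _make_exam_room_time_map(appointments: List[dict]):
--     # Two-pass grouping: first the distinct rooms in first-appearance order,
--     # then one comprehension per room collecting its times.
--     rooms = list(dict.fromkeys(a['exam_room'] for a in appointments))
--
--     exam_room_time_map = defaultdict(dict)
--     for room in rooms:
--         exam_room_time_map[room] = [
--             a['scheduled_time'].split('T')[1]
--             for a in appointments
--             if a['exam_room'] == room
--         ]
--
--     return exam_room_time_map
-- ===== Notes on version B (the rewrite author's own statement) =====
-- stated objective: alternative
-- what changed: A builds the grouping in one pass, mutating a defaultdict entry per appointment (default-insert, emptiness test, append); B is two-pass: it first computes the distinct rooms in first-appearance order with dict.fromkeys, then assigns each room its complete time list via one filtered comprehension.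
import Mathlib
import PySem

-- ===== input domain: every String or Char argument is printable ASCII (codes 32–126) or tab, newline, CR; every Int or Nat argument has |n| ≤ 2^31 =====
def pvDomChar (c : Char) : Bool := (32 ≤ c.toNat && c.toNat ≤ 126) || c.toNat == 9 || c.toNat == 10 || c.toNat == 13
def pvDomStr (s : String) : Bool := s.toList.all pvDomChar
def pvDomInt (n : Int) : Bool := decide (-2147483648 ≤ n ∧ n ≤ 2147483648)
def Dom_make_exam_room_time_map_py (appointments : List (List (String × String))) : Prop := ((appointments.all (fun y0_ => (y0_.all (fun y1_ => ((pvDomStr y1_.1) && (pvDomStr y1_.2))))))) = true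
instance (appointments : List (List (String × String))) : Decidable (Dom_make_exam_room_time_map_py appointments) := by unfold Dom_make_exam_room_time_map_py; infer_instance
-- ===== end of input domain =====

-- B replaces A's single-pass defaultdict accumulation by a two-pass scheme (distinct rooms
-- first, then one filtered comprehension per room); objective: alternative decomposition.

-- shared helpers for the two Python expressions both versions use verbatim:
-- appointment['exam_room'] on the dict built from the pairs (none = KeyError)
def pvRoom? (app : List (String × String)) : Option String :=
  (PySem.Dict.ofList app).get? "exam_room"

-- appointment['scheduled_time'].split('T')[1]  (none = KeyError / IndexError)
def pvTime? (app : List (String × String)) : Option String :=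
  match (PySem.Dict.ofList app).get? "scheduled_time" with
  | some st => (PySem.Str.split? st "T").bind (fun parts => PySem.List.pyGet? parts 1)
  | none => none

-- ===== PORT A =====
def make_exam_room_time_map_py (appointments : List (List (String × String))) : List (String × List String) :=
  (appointments.foldl (fun d app =>
      match pvRoom? app, pvTime? app with
      | some exam_room, some scheduled_time =>
          -- exam_room_time_map[exam_room] on the defaultdict inserts the default on a missing
          -- key ({}; modelled as the empty list, which the next line at once replaces by [])
          let d1 := PySem.Dict.setdefault d exam_room []
          -- if not exam_room_time_map[exam_room]: exam_room_time_map[exam_room] = []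
          let d2 := if PySem.Dict.getD d1 exam_room [] = [] then PySem.Dict.insert d1 exam_room [] else d1
          -- exam_room_time_map[exam_room].append(scheduled_time)
          PySem.Dict.insert d2 exam_room (PySem.Dict.getD d2 exam_room [] ++ [scheduled_time])
      | _, _ => d)  -- KeyError / IndexError: excluded by Pre_
    PySem.Dict.empty).items

-- ===== PORT B =====
def make_exam_room_time_map_py_alt (appointments : List (List (String × String))) : List (String × List String) :=
  -- rooms = list(dict.fromkeys(a['exam_room'] for a in appointments))
  -- (.getD "" is never taken under Pre_: every appointment has the key)
  let rooms := PySem.List.dedup (appointments.map (fun a => (pvRoom? a).getD ""))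
  (rooms.foldl (fun d room =>
      PySem.Dict.insert d room
        ((appointments.filter (fun a => (pvRoom? a).getD "" == room)).map
          (fun a => (pvTime? a).getD "")))
    PySem.Dict.empty).items

-- ===== PRECONDITION & SPEC =====
-- Pre_ excludes exactly the appointments missing the 'exam_room' or 'scheduled_time' key or
-- whose scheduled_time does not split into at least two pieces around 'T' — there Python A
-- raises KeyError / IndexError.
def Pre_make_exam_room_time_map_py (appointments : List (List (String × String))) : Prop :=
  ∀ app ∈ appointments,
    ((PySem.Dict.ofList app).get? "exam_room").isSome = true ∧
    ((PySem.Dict.ofList app).get? "scheduled_time").any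
      (fun st => decide (2 ≤ ((PySem.Str.split? st "T").getD []).length)) = true
instance (appointments : List (List (String × String))) : Decidable (Pre_make_exam_room_time_map_py appointments) := by unfold Pre_make_exam_room_time_map_py; infer_instance

def pvWitness_make_exam_room_time_map_py : (List (List (String × String))) :=
  [[("exam_room", "1"), ("scheduled_time", "2020-01-01T09:00")],
   [("exam_room", "2"), ("scheduled_time", "2020-01-01T10:00")],
   [("exam_room", "1"), ("scheduled_time", "2020-01-01T11:00")]]

def Spec_make_exam_room_time_map_py (appointments : List (List (String × String))) (out : List (String × List String)) : Prop := out = make_exam_room_time_map_py_alt appointments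
instance (appointments : List (List (String × String))) (out : List (String × List String)) : Decidable (Spec_make_exam_room_time_map_py appointments out) := by unfold Spec_make_exam_room_time_map_py; infer_instance

-- ===== CLAIM (what is proved, stated in full; the proofs are below) =====
def Claim_equal_make_exam_room_time_map_py : Prop := ∀ (appointments : List (List (String × String))), Dom_make_exam_room_time_map_py appointments → Pre_make_exam_room_time_map_py appointments → Spec_make_exam_room_time_map_py appointments (make_exam_room_time_map_py appointments)

-- ===== LEMMAS AND PROOFS =====

-- the room / time actually read from an appointment (under Pre_ both options are some)
def pvKeyOf (app : List (String × String)) : String := (pvRoom? app).getD ""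
def pvValOf (app : List (String × String)) : String := (pvTime? app).getD ""

-- A's loop body, on an appointment where neither lookup raises, is exactly
-- d[room] = d.get(room, []) + [time], i.e. Dict.modify.
theorem stepA_eq_modify (d : PySem.Dict String (List String)) (room time : String) :
    (let d1 := PySem.Dict.setdefault d room []
     let d2 := if PySem.Dict.getD d1 room [] = [] then PySem.Dict.insert d1 room [] else d1
     PySem.Dict.insert d2 room (PySem.Dict.getD d2 room [] ++ [time]))
      = d.modify room [] (· ++ [time]) := by
  show _ = d.insert room (d.getD room [] ++ [time])
  by_cases hc : d.contains room = true
  · rw [PySem.Dict.setdefault_of_contains d [] hc]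
    by_cases he : PySem.Dict.getD d room [] = []
    · simp only [he, ↓reduceIte, PySem.Dict.getD_insert_self, PySem.Dict.insert_insert_self]
    · simp only [if_neg he]
  · rw [PySem.Dict.setdefault_of_not_contains d [] (by simpa using hc),
        PySem.Dict.getD_of_not_contains d [] (by simpa using hc)]
    simp only [↓reduceIte, PySem.Dict.getD_insert_self, PySem.Dict.insert_insert_self]

theorem pyGet?_one_of_two_le {l : List String} (h : 2 ≤ l.length) :
    PySem.List.pyGet? l 1 = some l[1] := by
  simp only [PySem.List.pyGet?, PySem.List.pyIdx?, zero_le_one, ↓reduceIte, Nat.one_lt_cast,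
    Int.toNat_one]
  rw [if_pos (by omega)]
  simp [List.getElem?_eq_getElem (by omega : 1 < l.length)]
  rfl

theorem pre_some {appointments : List (List (String × String))}
    (hpre : Pre_make_exam_room_time_map_py appointments)
    {app : List (String × String)} (hmem : app ∈ appointments) :
    pvRoom? app = some (pvKeyOf app) ∧ pvTime? app = some (pvValOf app) := by
  obtain ⟨hr, ht⟩ := hpre app hmem
  constructor
  · cases hro : pvRoom? app with
    | none => rw [pvRoom?] at hro; rw [hro] at hr; simp at hr
    | some r => simp [pvKeyOf, hro]
  · cases hst : (PySem.Dict.ofList app).get? "scheduled_time" with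
    | none => rw [hst] at ht; simp at ht
    | some st =>
      rw [hst] at ht
      simp only [Option.any_some, decide_eq_true_eq] at ht
      cases hsp : PySem.Str.split? st "T" with
      | none => rw [hsp] at ht; simp at ht
      | some parts =>
        rw [hsp] at ht
        simp only [Option.getD_some] at ht
        have : pvTime? app = some parts[1] := by
          simp only [pvTime?, hst, hsp, Option.bind_some, pyGet?_one_of_two_le ht]
        simp [pvValOf, this]

theorem make_exam_room_time_map_py_spec : Claim_equal_make_exam_room_time_map_py := by
  intro appointments _ hpre
  show make_exam_room_time_map_py appointments = make_exam_room_time_map_py_alt appointments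
  -- rewrite A's fold into the canonical grouping fold over (room, time) pairs
  have hA : make_exam_room_time_map_py appointments =
      ((appointments.map (fun a => (pvKeyOf a, pvValOf a))).foldl
        (fun d p => d.modify p.1 [] (· ++ [p.2])) PySem.Dict.empty).items := by
    rw [make_exam_room_time_map_py, List.foldl_map]
    congr 1
    apply PySem.List.foldl_congr_mem
    intro d app hmem
    obtain ⟨hr, ht⟩ := pre_some hpre hmem
    rw [hr, ht]
    exact stepA_eq_modify d (pvKeyOf app) (pvValOf app)
  set l := appointments.map (fun a => (pvKeyOf a, pvValOf a)) with hl
  set D := l.foldl (fun d p => d.modify p.1 [] (· ++ [p.2]))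
    (PySem.Dict.empty : PySem.Dict String (List String)) with hD
  have hnodup : D.keys.Nodup :=
    PySem.Dict.nodup_keys_foldl_modify_key l Prod.fst [] (fun _ p => (· ++ [p.2])) _
      PySem.Dict.nodup_keys_empty
  have hkeys : D.keys = PySem.List.dedup (appointments.map pvKeyOf) := by
    rw [hD, PySem.Dict.keys_foldl_modify_key l Prod.fst [] (fun _ p => (· ++ [p.2]))]
    simp only [hl, List.map_map]
    rfl
  have hitems : make_exam_room_time_map_py appointments =
      D.keys.map (fun k => (k, D.getD k [])) := by
    exact hA.trans (PySem.Dict.items_eq_map_keys D hnodup [])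
  -- B's fold inserts each distinct room exactly once: its items are a plain map
  have hBitems : make_exam_room_time_map_py_alt appointments =
      (PySem.List.dedup (appointments.map pvKeyOf)).map
        (fun r => (r, (appointments.filter (fun a => pvKeyOf a == r)).map pvValOf)) := by
    rw [make_exam_room_time_map_py_alt]
    have := PySem.Dict.items_foldl_insert_fresh
      (PySem.List.dedup (appointments.map (fun a => (pvRoom? a).getD "")))
      (fun r => r)
      (fun room => (appointments.filter (fun a => (pvRoom? a).getD "" == room)).map
        (fun a => (pvTime? a).getD ""))
      PySem.Dict.empty
      (fun a _ => PySem.Dict.contains_empty a)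
      (by simp)
    simpa [pvKeyOf, pvValOf] using this
  rw [hitems, hBitems, hkeys]
  apply List.map_congr_left
  intro r _
  have : D.getD r [] = (l.filter (fun p => p.1 == r)).map (·.2) := by
    rw [hD]
    have := PySem.Dict.getD_foldl_modify_append l PySem.Dict.empty r
    simpa using this
  rw [this, hl, List.filter_map, List.map_map]
  rfl
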